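-- pv_equiv track=rewrite | github.com/manuel100472191/Practica2Heuristica | parte-2/ASTARTralados.py | datos_del_mapa
-- ===== SOURCE A (Python) =====
-- def datos_del_mapa(mapa: [[str, ], ]) -> (int, [(int,), ], [int, ], [int,], [int,]):
--     """
--         Devuelve las posiciones de las casillas relevantes del mapa, como son el parking los centros de recogidas y
--         dos listas con la ubicación de los pacientes contagiosos y no contagiosos
--     """
--     posiciones_pacientes_n = []
--     posiciones_pacientes_c = []
--     posicion_parking = []
--     posicion_cn = []
--     posicion_cc = []
--     for i, fila in enumerate(mapa):
--         for j, casilla in enumerate(fila):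
--             if casilla == "N":
--                 posiciones_pacientes_n.append([i, j])
--             elif casilla == "C":
--                 posiciones_pacientes_c.append([i, j])
--             elif casilla == "P":
--                 posicion_parking = [i, j]
--             elif casilla == "CC":
--                 posicion_cc = [i, j]
--             elif casilla == "CN":
--                 posicion_cn = [i, j]
--     return posiciones_pacientes_n, posiciones_pacientes_c, posicion_parking, posicion_cn, posicion_cc
-- ===== SOURCE B (Python) =====
-- def datos_del_mapa(mapa):
--     cells = [(i, j, c) for i, fila in enumerate(mapa) for j, c in enumerate(fila)]
--     ns = [[i, j] for i, j, c in cells if c == "N"]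
--     cs = [[i, j] for i, j, c in cells if c == "C"]
--     ps = [[i, j] for i, j, c in cells if c == "P"]
--     ccs = [[i, j] for i, j, c in cells if c == "CC"]
--     cns = [[i, j] for i, j, c in cells if c == "CN"]
--     return (ns, cs, ps[-1] if ps else [], cns[-1] if cns else [], ccs[-1] if ccs else [])
-- ===== Notes on version B (the rewrite author's own statement) =====
-- stated objective: simpler
-- what changed: Replaces the single nested loop mutating five accumulators by a flatten-then-filter decomposition: the grid is enumerated once into (i,j,cell) triples and each of the five results is an independent comprehension over that list, taking the last match for the singleton positions.
import Mathlib
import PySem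

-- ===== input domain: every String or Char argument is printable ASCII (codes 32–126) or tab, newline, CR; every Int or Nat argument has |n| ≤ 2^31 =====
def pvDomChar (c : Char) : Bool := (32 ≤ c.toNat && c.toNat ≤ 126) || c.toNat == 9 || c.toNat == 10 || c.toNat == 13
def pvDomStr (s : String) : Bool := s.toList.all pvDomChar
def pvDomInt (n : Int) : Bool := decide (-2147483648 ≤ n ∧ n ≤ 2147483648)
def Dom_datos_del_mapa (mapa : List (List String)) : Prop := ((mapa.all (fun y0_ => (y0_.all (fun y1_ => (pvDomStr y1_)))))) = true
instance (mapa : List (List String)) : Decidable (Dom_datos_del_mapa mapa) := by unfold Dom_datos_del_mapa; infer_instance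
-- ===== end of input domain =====

-- B replaces A's nested loop over five mutable accumulators by one flatten of the grid
-- into (i,j,cell) triples followed by five independent filters (objective: simpler decomposition).

-- ===== PORT A =====
-- A's loop body (the elif chain), acting on the state (pacientes_n, pacientes_c, parking, cn, cc)
def pvStepA (st : List (List Int) × List (List Int) × List Int × List Int × List Int)
    (t : Int × Int × String) : List (List Int) × List (List Int) × List Int × List Int × List Int :=
  if t.2.2 = "N" then (st.1 ++ [[t.1, t.2.1]], st.2.1, st.2.2.1, st.2.2.2.1, st.2.2.2.2)
  else if t.2.2 = "C" then (st.1, st.2.1 ++ [[t.1, t.2.1]], st.2.2.1, st.2.2.2.1, st.2.2.2.2)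
  else if t.2.2 = "P" then (st.1, st.2.1, [t.1, t.2.1], st.2.2.2.1, st.2.2.2.2)
  else if t.2.2 = "CC" then (st.1, st.2.1, st.2.2.1, st.2.2.2.1, [t.1, t.2.1])
  else if t.2.2 = "CN" then (st.1, st.2.1, st.2.2.1, [t.1, t.2.1], st.2.2.2.2)
  else st

def datos_del_mapa (mapa : List (List String)) : List (List Int) × List (List Int) × List Int × List Int × List Int :=
  (PySem.List.enumerate mapa).foldl
    (fun st pif =>
      (PySem.List.enumerate pif.2).foldl (fun st pjc => pvStepA st (pif.1, pjc.1, pjc.2)) st)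
    ([], [], [], [], [])

-- ===== PORT B =====
def datos_del_mapa_alt (mapa : List (List String)) : List (List Int) × List (List Int) × List Int × List Int × List Int :=
  let cells := (PySem.List.enumerate mapa).flatMap
    (fun pif => (PySem.List.enumerate pif.2).map (fun pjc => (pif.1, pjc.1, pjc.2)))
  let ns := cells.filterMap (fun t => if t.2.2 = "N" then some [t.1, t.2.1] else none)
  let cs := cells.filterMap (fun t => if t.2.2 = "C" then some [t.1, t.2.1] else none)
  let ps := cells.filterMap (fun t => if t.2.2 = "P" then some [t.1, t.2.1] else none)
  let ccs := cells.filterMap (fun t => if t.2.2 = "CC" then some [t.1, t.2.1] else none)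
  let cns := cells.filterMap (fun t => if t.2.2 = "CN" then some [t.1, t.2.1] else none)
  (ns, cs, ps.getLast?.getD [], cns.getLast?.getD [], ccs.getLast?.getD [])

-- ===== PRECONDITION & SPEC =====
def Spec_datos_del_mapa (mapa : List (List String)) (out : List (List Int) × List (List Int) × List Int × List Int × List Int) : Prop := out = datos_del_mapa_alt mapa
instance (mapa : List (List String)) (out : List (List Int) × List (List Int) × List Int × List Int × List Int) : Decidable (Spec_datos_del_mapa mapa out) := by unfold Spec_datos_del_mapa; infer_instance

-- ===== CLAIM (what is proved, stated in full; the proofs are below) =====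
def Claim_equal_datos_del_mapa : Prop := ∀ (mapa : List (List String)), Dom_datos_del_mapa mapa → Spec_datos_del_mapa mapa (datos_del_mapa mapa)

-- ===== LEMMAS AND PROOFS =====

theorem pv_lastD_cons (v : List Int) (xs : List (List Int)) (p : List Int) :
    ((v :: xs).getLast?).getD p = (xs.getLast?).getD v := by
  induction xs generalizing v p with
  | nil => simp
  | cons h t ih => rw [List.getLast?_cons_cons, ih, ih]

-- folding A's step over any cell list from any state yields B's filtered lists
theorem pv_fold_step (cl : List (Int × Int × String))
    (n c : List (List Int)) (p cn cc : List Int) :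
    cl.foldl pvStepA (n, c, p, cn, cc) =
      (n ++ cl.filterMap (fun t => if t.2.2 = "N" then some [t.1, t.2.1] else none),
       c ++ cl.filterMap (fun t => if t.2.2 = "C" then some [t.1, t.2.1] else none),
       ((cl.filterMap (fun t => if t.2.2 = "P" then some [t.1, t.2.1] else none)).getLast?).getD p,
       ((cl.filterMap (fun t => if t.2.2 = "CN" then some [t.1, t.2.1] else none)).getLast?).getD cn,
       ((cl.filterMap (fun t => if t.2.2 = "CC" then some [t.1, t.2.1] else none)).getLast?).getD cc) := by
  induction cl generalizing n c p cn cc with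
  | nil => simp
  | cons t cl ih =>
    by_cases h1 : t.2.2 = "N"
    · simp [pvStepA, h1, ih]
    · by_cases h2 : t.2.2 = "C"
      · simp [pvStepA, h2, ih]
      · by_cases h3 : t.2.2 = "P"
        · simp [pvStepA, h3, ih, pv_lastD_cons]
        · by_cases h4 : t.2.2 = "CC"
          · simp [pvStepA, h4, ih, pv_lastD_cons]
          · by_cases h5 : t.2.2 = "CN"
            · simp [pvStepA, h5, ih, pv_lastD_cons]
            · simp [pvStepA, h1, h2, h3, h4, h5, ih]

-- A's nested fold equals the single fold over the flattened cell list
theorem pv_nested_flat (rows : List (Int × List String))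
    (st : List (List Int) × List (List Int) × List Int × List Int × List Int) :
    rows.foldl
      (fun st pif =>
        (PySem.List.enumerate pif.2).foldl (fun st pjc => pvStepA st (pif.1, pjc.1, pjc.2)) st) st
    = (rows.flatMap
        (fun pif => (PySem.List.enumerate pif.2).map (fun pjc => (pif.1, pjc.1, pjc.2)))).foldl
        pvStepA st := by
  induction rows generalizing st with
  | nil => simp
  | cons r rows ih => simp [List.flatMap_cons, List.foldl_append, List.foldl_map, ih]

-- ===== VERDICT (by name: the statement is the Claim_ definition above) =====
theorem datos_del_mapa_spec : Claim_equal_datos_del_mapa := by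
  intro mapa _
  show datos_del_mapa mapa = datos_del_mapa_alt mapa
  unfold datos_del_mapa datos_del_mapa_alt
  rw [pv_nested_flat, pv_fold_step]
  simp
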